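-- pv_equiv track=rewrite | github.com/beingprince/frudgeCare-AI | services/ai-engine/main.py | _maybe_escalate_for_vitals
-- ===== SOURCE A (Python) =====
-- from typing import List, Optional, Dict, Any, Union
--
-- def _maybe_escalate_for_vitals(
--     urgency_label: str, vitals: List[Dict[str, Any]]
-- ) -> str:
--     """Escalate to CRITICAL whenever NLP found a critical vital flag."""
--     if any(v.get("status") == "critical" for v in vitals):
--         return "CRITICAL"
--     if urgency_label == "NON-URGENT" and any(
--         v.get("status") == "warning" for v in vitals
--     ):
--         return "SEMI-URGENT"
--     return urgency_label
-- ===== SOURCE B (Python) =====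
-- def _maybe_escalate_for_vitals(urgency_label, vitals):
--     """One pass computing the maximum numeric severity (critical=2, warning=1,
--     other=0), then a severity table decides the label."""
--     sev = 0
--     for v in vitals:
--         s = v.get("status")
--         sev = max(sev, 2 if s == "critical" else 1 if s == "warning" else 0)
--     if sev == 2:
--         return "CRITICAL"
--     if sev == 1 and urgency_label == "NON-URGENT":
--         return "SEMI-URGENT"
--     return urgency_label
-- ===== Notes on version B (the rewrite author's own statement) =====
-- stated objective: alternative
-- what changed: Replaced the two short-circuiting any() scans with a single accumulator pass that folds each vital's status into a numeric maximum severity (critical=2, warning=1, other=0), after which a severity table picks the label.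
import Mathlib
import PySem

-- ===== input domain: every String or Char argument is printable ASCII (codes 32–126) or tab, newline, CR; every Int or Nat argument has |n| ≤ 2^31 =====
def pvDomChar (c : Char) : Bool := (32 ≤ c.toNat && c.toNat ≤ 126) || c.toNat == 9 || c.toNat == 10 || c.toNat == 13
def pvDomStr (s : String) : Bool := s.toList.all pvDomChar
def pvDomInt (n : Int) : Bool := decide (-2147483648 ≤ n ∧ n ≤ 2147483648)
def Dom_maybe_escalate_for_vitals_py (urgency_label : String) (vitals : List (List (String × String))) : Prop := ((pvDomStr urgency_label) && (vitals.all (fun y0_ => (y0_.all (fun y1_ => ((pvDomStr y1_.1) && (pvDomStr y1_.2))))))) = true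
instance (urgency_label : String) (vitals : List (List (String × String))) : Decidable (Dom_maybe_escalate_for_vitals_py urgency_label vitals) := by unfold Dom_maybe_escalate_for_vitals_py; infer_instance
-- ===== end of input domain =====

-- ===== PORT A =====
-- B makes one accumulator pass computing the max numeric severity, then a severity table picks the label (alternative decomposition, same cost).
def maybe_escalate_for_vitals_py (urgency_label : String) (vitals : List (List (String × String))) : String :=
  if vitals.any (fun v => (PySem.Dict.mk v).get? "status" == some "critical") then "CRITICAL"
  else if urgency_label == "NON-URGENT" &&
      vitals.any (fun v => (PySem.Dict.mk v).get? "status" == some "warning") then "SEMI-URGENT"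
  else urgency_label

-- ===== PORT B =====
-- severity code of one vital: 2 if s == "critical" else 1 if s == "warning" else 0
def pvCode (v : List (String × String)) : Nat :=
  if (PySem.Dict.mk v).get? "status" == some "critical" then 2
  else if (PySem.Dict.mk v).get? "status" == some "warning" then 1
  else 0

def maybe_escalate_for_vitals_py_alt (urgency_label : String) (vitals : List (List (String × String))) : String :=
  let sev := vitals.foldl (fun s v => max s (pvCode v)) 0
  if sev == 2 then "CRITICAL"
  else if sev == 1 && urgency_label == "NON-URGENT" then "SEMI-URGENT"
  else urgency_label

-- ===== PRECONDITION & SPEC =====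
def Spec_maybe_escalate_for_vitals_py (urgency_label : String) (vitals : List (List (String × String))) (out : String) : Prop := out = maybe_escalate_for_vitals_py_alt urgency_label vitals
instance (urgency_label : String) (vitals : List (List (String × String))) (out : String) : Decidable (Spec_maybe_escalate_for_vitals_py urgency_label vitals out) := by unfold Spec_maybe_escalate_for_vitals_py; infer_instance

-- ===== CLAIM (what is proved, stated in full; the proofs are below) =====
def Claim_equal_maybe_escalate_for_vitals_py : Prop := ∀ (urgency_label : String) (vitals : List (List (String × String))), Dom_maybe_escalate_for_vitals_py urgency_label vitals → Spec_maybe_escalate_for_vitals_py urgency_label vitals (maybe_escalate_for_vitals_py urgency_label vitals)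

-- ===== LEMMAS AND PROOFS =====
-- the fold computes 2 / 1 / 0 according to the two any-scans of A
theorem pv_fold_sev (vitals : List (List (String × String))) (a : Nat) :
    vitals.foldl (fun s v => max s (pvCode v)) a
      = max a (if vitals.any (fun v => (PySem.Dict.mk v).get? "status" == some "critical") then 2
        else if vitals.any (fun v => (PySem.Dict.mk v).get? "status" == some "warning") then 1
        else 0) := by
  induction vitals generalizing a with
  | nil => simp
  | cons v l ih =>
    simp only [List.foldl_cons, List.any_cons, ih]
    unfold pvCode
    by_cases h1 : (PySem.Dict.mk v).get? "status" == some "critical" <;>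
      by_cases h2 : (PySem.Dict.mk v).get? "status" == some "warning" <;>
        simp [h1, h2] <;> split_ifs <;> omega

-- ===== VERDICT (by name: the statement is the Claim_ definition above) =====
theorem maybe_escalate_for_vitals_py_spec : Claim_equal_maybe_escalate_for_vitals_py := by
  intro ul vitals _
  unfold Spec_maybe_escalate_for_vitals_py maybe_escalate_for_vitals_py maybe_escalate_for_vitals_py_alt
  rw [pv_fold_sev]
  by_cases hc : vitals.any (fun v => (PySem.Dict.mk v).get? "status" == some "critical") <;>
    by_cases hw : vitals.any (fun v => (PySem.Dict.mk v).get? "status" == some "warning") <;>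
      by_cases hu : ul == "NON-URGENT" <;> simp [hc, hw, hu]
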